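-- pv_equiv track=rewrite | github.com/Goos3Juic3/WonderJourneyGPS | WJbackend/services/scoring.py | build_pros_and_cons
-- ===== SOURCE A (Python) =====
-- def build_pros_and_cons(scored_places, limit=3):
--     pros = [
--         f'{place["name"]} ({place["type"]})'
--         for place in scored_places
--         if place["label"] == "LIKE"
--     ][:limit]
--
--     cons = [
--         f'{place["name"]} ({place["type"]})'
--         for place in scored_places
--         if place["label"] == "DISLIKE"
--     ][:limit]
--
--     return pros, cons
-- ===== SOURCE B (Python) =====
-- def build_pros_and_cons(scored_places, limit=3):
--     # group the places by their label into a dict-of-lists index,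
--     # then read the two buckets of interest, format and slice them
--     groups = {}
--     for place in scored_places:
--         groups.setdefault(place["label"], []).append(place)
--     pros = [f'{p["name"]} ({p["type"]})' for p in groups.get("LIKE", [])][:limit]
--     cons = [f'{p["name"]} ({p["type"]})' for p in groups.get("DISLIKE", [])][:limit]
--     return pros, cons
-- ===== Notes on version B (the rewrite author's own statement) =====
-- stated objective: alternative
-- what changed: Replaces A's two label-filtering comprehensions over the whole input by a single grouping pass that builds a dict-of-lists index keyed by label, from which the LIKE and DISLIKE buckets are then formatted and sliced.
import Mathlib
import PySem

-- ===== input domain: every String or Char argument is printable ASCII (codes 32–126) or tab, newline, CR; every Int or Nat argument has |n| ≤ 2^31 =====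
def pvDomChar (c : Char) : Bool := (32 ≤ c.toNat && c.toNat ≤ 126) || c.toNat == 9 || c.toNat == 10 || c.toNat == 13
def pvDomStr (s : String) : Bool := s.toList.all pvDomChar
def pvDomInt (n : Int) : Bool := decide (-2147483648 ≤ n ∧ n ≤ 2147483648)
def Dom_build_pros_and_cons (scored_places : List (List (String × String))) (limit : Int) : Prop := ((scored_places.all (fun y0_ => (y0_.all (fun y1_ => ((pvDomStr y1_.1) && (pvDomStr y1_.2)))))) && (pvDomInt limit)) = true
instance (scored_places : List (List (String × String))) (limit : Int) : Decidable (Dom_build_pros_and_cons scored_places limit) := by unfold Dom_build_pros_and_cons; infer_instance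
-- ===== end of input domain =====

-- B replaces A's two label-filtering scans by one grouping pass into a dict-of-lists index keyed by label.

-- shared formatting of the f-string f'{place["name"]} ({place["type"]})' (dict lookup = first match in the association list)
def pvFmt (place : List (String × String)) : String :=
  ((place.lookup "name").getD "") ++ " (" ++ ((place.lookup "type").getD "") ++ ")"

def pvLabel (place : List (String × String)) : String :=
  (place.lookup "label").getD ""

-- ===== PORT A =====
-- two filtering comprehensions, each sliced by [:limit]
def build_pros_and_cons (scored_places : List (List (String × String))) (limit : Int) : List String × List String :=
  (PySem.List.slice ((scored_places.filter (fun p => pvLabel p == "LIKE")).map pvFmt) none (some limit),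
   PySem.List.slice ((scored_places.filter (fun p => pvLabel p == "DISLIKE")).map pvFmt) none (some limit))

-- ===== PORT B =====
-- one grouping pass building a dict-of-lists keyed by label (setdefault+append = modify),
-- then format and slice the "LIKE" and "DISLIKE" buckets
def build_pros_and_cons_alt (scored_places : List (List (String × String))) (limit : Int) : List String × List String :=
  let groups : PySem.Dict String (List (List (String × String))) :=
    scored_places.foldl (fun d p => d.modify (pvLabel p) [] (· ++ [p])) PySem.Dict.empty
  (PySem.List.slice ((groups.getD "LIKE" []).map pvFmt) none (some limit),
   PySem.List.slice ((groups.getD "DISLIKE" []).map pvFmt) none (some limit))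

-- ===== PRECONDITION & SPEC =====
-- Pre_ excludes exactly the inputs where Python A raises KeyError: a place missing the "label" key,
-- or a place labelled LIKE/DISLIKE missing "name" or "type".
def Pre_build_pros_and_cons (scored_places : List (List (String × String))) (limit : Int) : Prop :=
  ∀ p ∈ scored_places, (p.lookup "label").isSome ∧
    (p.lookup "label" = some "LIKE" ∨ p.lookup "label" = some "DISLIKE" →
      (p.lookup "name").isSome ∧ (p.lookup "type").isSome)
instance (scored_places : List (List (String × String))) (limit : Int) : Decidable (Pre_build_pros_and_cons scored_places limit) := by unfold Pre_build_pros_and_cons; infer_instance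

def pvWitness_build_pros_and_cons : (List (List (String × String))) × Int :=
  ([[("label", "LIKE"), ("name", "Cafe"), ("type", "food")],
    [("label", "DISLIKE"), ("name", "Mall"), ("type", "shop")],
    [("label", "MEH")]], 3)

def Spec_build_pros_and_cons (scored_places : List (List (String × String))) (limit : Int) (out : List String × List String) : Prop := out = build_pros_and_cons_alt scored_places limit
instance (scored_places : List (List (String × String))) (limit : Int) (out : List String × List String) : Decidable (Spec_build_pros_and_cons scored_places limit out) := by unfold Spec_build_pros_and_cons; infer_instance

-- ===== CLAIM (what is proved, stated in full; the proofs are below) =====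
def Claim_equal_build_pros_and_cons : Prop := ∀ (scored_places : List (List (String × String))) (limit : Int), Dom_build_pros_and_cons scored_places limit → Pre_build_pros_and_cons scored_places limit → Spec_build_pros_and_cons scored_places limit (build_pros_and_cons scored_places limit)

-- ===== LEMMAS AND PROOFS =====

-- the grouping fold's bucket at key c is exactly the label-filtered sublist, in order
theorem pvGroups_getD (sp : List (List (String × String))) (c : String) :
    (sp.foldl (fun d p => d.modify (pvLabel p) [] (· ++ [p])) PySem.Dict.empty).getD c []
      = sp.filter (fun p => pvLabel p == c) := by
  have h := PySem.Dict.getD_foldl_modify_append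
      (l := sp.map (fun p => (pvLabel p, p)))
      (d := (PySem.Dict.empty : PySem.Dict String (List (List (String × String))))) (c := c)
  rw [List.foldl_map] at h
  simp only [h, PySem.Dict.getD_empty, List.nil_append, List.filter_map]
  rw [List.map_map]
  simp [Function.comp_def]

-- ===== VERDICT (by name: the statement is the Claim_ definition above) =====
theorem build_pros_and_cons_spec : Claim_equal_build_pros_and_cons := by
  intro sp limit _ _
  unfold Spec_build_pros_and_cons build_pros_and_cons build_pros_and_cons_alt
  simp only [pvGroups_getD]
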